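-- pv_equiv track=rewrite | github.com/pypi-data/pypi-mirror-403 | packages/atlas-agent/atlas_agent-1.0.3-py3-none-any.whl/atlas_agent/gateway_model.py | normalize_model_id
-- ===== SOURCE A (Python) =====
-- def normalize_model_id(raw: str | None) -> str:
--     """Best-effort normalization for gateway-reported model ids.
--
--     Gateways may decorate model names (e.g. vendor prefixes like "openai/gpt-5.2"
--     or "openai:gpt-5.2"). We try to normalize without being overly clever.
--     """
--
--     s = str(raw or "").strip()
--     if not s:
--         return ""
--     # Drop any trailing annotations (rare but seen in some gateways).
--     s = s.split()[0]
--     # Strip vendor prefixes (keep the last segment).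
--     #
--     # Note: do not split on '@' here. Some gateways use '@' to attach routing
--     # metadata or versions (e.g., model@YYYY-MM-DD). Treat it as part of the id.
--     for sep in ("/", ":"):
--         if sep in s:
--             s = s.split(sep)[-1]
--     return s.strip().lower()
-- ===== SOURCE B (Python) =====
-- def normalize_model_id(raw: str | None) -> str:
--     s = str(raw or "").strip()
--     if not s:
--         return ""
--     s = s.split()[0]
--     # Keep everything after the rightmost '/' or ':' in one slice
--     # (rfind returns -1 when absent, so s[0:] keeps the whole id).
--     idx = max(s.rfind("/"), s.rfind(":"))
--     s = s[idx + 1:]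
--     return s.strip().lower()
-- ===== Notes on version B (the rewrite author's own statement) =====
-- stated objective: simpler
-- what changed: Replaces the loop of conditional split(sep)[-1] passes over ('/', ':') with a single rightmost-separator scan: idx = max(s.rfind('/'), s.rfind(':')) followed by one slice s[idx+1:].
import Mathlib
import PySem

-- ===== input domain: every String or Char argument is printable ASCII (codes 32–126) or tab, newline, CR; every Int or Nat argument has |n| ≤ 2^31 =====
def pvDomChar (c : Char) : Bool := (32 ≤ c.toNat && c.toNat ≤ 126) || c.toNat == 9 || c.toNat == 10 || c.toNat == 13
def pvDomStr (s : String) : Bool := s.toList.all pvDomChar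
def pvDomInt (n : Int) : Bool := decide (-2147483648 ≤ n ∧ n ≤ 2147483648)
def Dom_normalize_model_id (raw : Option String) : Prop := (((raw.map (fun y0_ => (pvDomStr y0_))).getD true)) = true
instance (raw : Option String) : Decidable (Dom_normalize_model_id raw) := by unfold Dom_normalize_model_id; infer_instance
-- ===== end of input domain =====

-- B replaces A's loop of conditional split(sep)[-1] passes over ('/', ':') by one
-- rightmost-separator scan (max of two rfinds) and a single slice; objective: simpler.

-- ===== PORT A =====
-- s.split()[0] and s.split(sep)[-1]: the indexed list is provably non-empty in A
-- (split() of a non-empty stripped string, split(sep) is always non-empty), so the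
-- Python indexing never raises; ported with headD / getLastD whose defaults are unreachable.
def normalize_model_id (raw : Option String) : String :=
  let s := PySem.Str.strip (raw.getD "")
  if s = "" then ""
  else
    let s := (PySem.Str.split₀ s).headD ""
    let s := ["/", ":"].foldl (fun s sep =>
      if PySem.Str.isIn sep s then ((PySem.Str.split? s sep).getD []).getLastD "" else s) s
    PySem.Str.lower (PySem.Str.strip s)

-- ===== PORT B =====
def normalize_model_id_alt (raw : Option String) : String :=
  let s := PySem.Str.strip (raw.getD "")
  if s = "" then ""
  else
    let s := (PySem.Str.split₀ s).headD ""
    let idx := max (PySem.Str.rfind s "/") (PySem.Str.rfind s ":")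
    let s := PySem.Str.slice s (some (idx + 1)) none
    PySem.Str.lower (PySem.Str.strip s)

-- ===== PRECONDITION & SPEC =====
def Spec_normalize_model_id (raw : Option String) (out : String) : Prop := out = normalize_model_id_alt raw
instance (raw : Option String) (out : String) : Decidable (Spec_normalize_model_id raw out) := by unfold Spec_normalize_model_id; infer_instance

-- ===== CLAIM (what is proved, stated in full; the proofs are below) =====
def Claim_equal_normalize_model_id : Prop := ∀ (raw : Option String), Dom_normalize_model_id raw → Spec_normalize_model_id raw (normalize_model_id raw)

-- ===== LEMMAS AND PROOFS =====

theorem pv_rtake_all {p : Char → Bool} {l : List Char} (h : ∀ x ∈ l, p x) :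
    List.rtakeWhile p l = l := by
  unfold List.rtakeWhile
  rw [List.takeWhile_eq_self_iff.mpr (by simpa using fun x hx => h x hx), List.reverse_reverse]

theorem pv_rtake_cons_mem {c : Char} {l : List Char} (h : c ∈ l) (a : Char) :
    List.rtakeWhile (· != c) (a :: l) = List.rtakeWhile (· != c) l := by
  unfold List.rtakeWhile
  have h2 : (a :: l).reverse = l.reverse ++ [a] := by simp
  rw [h2, List.takeWhile_append]
  have hlt : (List.takeWhile (· != c) l.reverse).length ≠ l.length := by
    intro he
    have heq := (List.takeWhile_prefix (l := l.reverse) (p := (· != c))).eq_of_length (by simpa using he)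
    have := List.takeWhile_eq_self_iff.mp heq c (by simpa using h)
    simp at this
  rw [if_neg (by simpa using hlt)]

theorem pv_split_go_last (c : Char) :
    ∀ (n : Nat) (l cur : List Char) (acc : List (List Char)) (d : List Char),
      l.length < n →
      (PySem.Chars.splitOn.go [c] n l cur acc).getLastD d =
        if c ∈ l then List.rtakeWhile (· != c) l else cur.reverse ++ l := by
  intro n
  induction n with
  | zero => intro l cur acc d h; omega
  | succ n ih =>
    intro l cur acc d h
    cases l with
    | nil => simp [PySem.Chars.splitOn.go]
    | cons c' rest =>
      rw [PySem.Chars.splitOn.go]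
      by_cases hc : c' = c
      · subst hc
        simp only [List.isPrefixOf, beq_self_eq_true, Bool.and_self, if_true]
        rw [show List.drop [c'].length (c' :: rest) = rest from rfl]
        rw [ih rest [] (cur.reverse :: acc) d (by simp at h ⊢; omega)]
        by_cases hm : c' ∈ rest
        · simp [hm, pv_rtake_cons_mem hm]
        · have hr := pv_rtake_all (p := (· != c')) (l := rest) (by intro x hx; simp; rintro rfl; exact hm hx)
          simp only [List.mem_cons, true_or, if_true, List.reverse_nil, List.nil_append]
          unfold List.rtakeWhile at hr ⊢
          have h2 : (c' :: rest).reverse = rest.reverse ++ [c'] := by simp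
          rw [h2, List.takeWhile_append]
          have hlen : (List.takeWhile (· != c') rest.reverse).length = rest.reverse.length := by
            rw [List.takeWhile_eq_self_iff.mpr (by intro x hx; simp at hx ⊢; rintro rfl; exact hm hx)]
          simp only [hlen, if_true, List.takeWhile_cons]
          simp
          exact fun hx => absurd hx hm
      · have hp : [c].isPrefixOf (c' :: rest) = false := by simp [List.isPrefixOf]; exact fun h' => (hc h'.symm).elim
        rw [hp]
        simp only [Bool.false_eq_true, if_false]
        rw [ih rest (c' :: cur) acc d (by simp at h ⊢; omega)]
        by_cases hm : c ∈ rest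
        · simp [hm, pv_rtake_cons_mem hm]
        · simp [hm]
          exact fun h' => absurd h'.symm hc

theorem pv_split_last (c : Char) (w : List Char) (d : List Char) :
    (PySem.Chars.splitOn w [c]).getLastD d = List.rtakeWhile (· != c) w := by
  unfold PySem.Chars.splitOn
  rw [pv_split_go_last c (w.length + 1) w [] [] d (by omega)]
  by_cases hm : c ∈ w
  · simp [hm]
  · simp [hm]
    exact (pv_rtake_all (by intro x hx; simp; rintro rfl; exact hm hx)).symm

theorem pv_rfind_go_append {a c : Char} (hne : a ≠ c) (t : List Char) :
    ∀ j, j ≤ t.length →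
      PySem.Chars.rfind.go (t ++ [a]) [c] j = PySem.Chars.rfind.go t [c] j := by
  intro j
  induction j with
  | zero =>
    intro _
    rw [PySem.Chars.rfind.go, PySem.Chars.rfind.go]
    cases t with
    | nil => simp [List.isPrefixOf]; exact fun h' => absurd h'.symm hne
    | cons x xs => simp [List.isPrefixOf]
  | succ j ih =>
    intro hj
    rw [PySem.Chars.rfind.go, PySem.Chars.rfind.go]
    rw [List.drop_append_of_le_length (by omega)]
    by_cases hd : j + 1 = t.length
    · rw [List.drop_of_length_le (l := t) (i := j+1) (by omega)]
      simp only [List.isPrefixOf, Bool.false_eq_true, if_false]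
      rw [if_neg (by simp; exact fun h' => absurd h'.symm hne)]
      exact ih (by omega)
    · have : j + 1 < t.length := by omega
      cases hdrop : List.drop (j+1) t with
      | nil => exfalso; have hld : (List.drop (j+1) t).length = t.length - (j+1) := List.length_drop; rw [hdrop] at hld; simp at hld; omega
      | cons x xs =>
        simp [List.isPrefixOf]
        by_cases hx : x = c
        · simp [hx]
        · rw [if_neg (fun h => hx h.symm), if_neg (fun h => hx h.symm)]
          exact ih (by omega)

theorem pv_rfind_nil (c : Char) : PySem.Chars.rfind [] [c] = -1 := by
  rw [PySem.Chars.rfind, PySem.Chars.rfind.go.eq_def]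
  simp [List.isPrefixOf]

theorem pv_rfind_append (t : List Char) (a c : Char) :
    PySem.Chars.rfind (t ++ [a]) [c] =
      if a = c then (t.length : Int) else PySem.Chars.rfind t [c] := by
  rw [PySem.Chars.rfind]
  have hlen : (t ++ [a]).length = t.length + 1 := by simp
  rw [hlen, PySem.Chars.rfind.go]
  rw [List.drop_of_length_le (by simp)]
  simp only [List.isPrefixOf, Bool.false_eq_true, if_false]
  by_cases ha : a = c
  · subst ha
    cases ht : t.length with
    | zero =>
      have : t = [] := List.eq_nil_of_length_eq_zero ht
      subst this
      rw [PySem.Chars.rfind.go]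
      simp [List.isPrefixOf]
    | succ m =>
      rw [PySem.Chars.rfind.go]
      rw [show m + 1 = t.length from ht.symm, List.drop_append_of_le_length (le_refl _), List.drop_of_length_le (le_refl _)]
      simp [List.isPrefixOf, ht]
  · rw [if_neg ha, PySem.Chars.rfind]
    exact pv_rfind_go_append ha t t.length (le_refl _)

theorem pv_rfind_bounds (c : Char) (t : List Char) :
    -1 ≤ PySem.Chars.rfind t [c] ∧ PySem.Chars.rfind t [c] < t.length := by
  induction t using List.reverseRecOn with
  | nil => rw [pv_rfind_nil]; simp
  | append_singleton t a ih =>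
    rw [pv_rfind_append]
    by_cases ha : a = c
    · simp [ha]
    · simp only [ha, if_false]
      constructor
      · exact ih.1
      · have := ih.2; simp; omega

theorem pv_drop_max (w : List Char) :
    List.drop (max (PySem.Chars.rfind w ['/']) (PySem.Chars.rfind w [':']) + 1).toNat w =
      List.rtakeWhile (fun a => a != '/' && a != ':') w := by
  induction w using List.reverseRecOn with
  | nil => simp [pv_rfind_nil]
  | append_singleton t a ih =>
    rw [pv_rfind_append, pv_rfind_append, List.rtakeWhile_concat]
    by_cases h1 : a = '/'
    · have h2 : ¬ a = ':' := by subst h1; decide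
      simp only [h1, if_true]
      have hb := (pv_rfind_bounds ':' t).2
      have hmax : max ((t.length : Int)) (PySem.Chars.rfind t [':']) = t.length := by omega
      rw [if_neg (by subst h1; decide)]
      rw [hmax]
      apply List.drop_of_length_le
      simp
    · by_cases h2 : a = ':'
      · simp only [h2, if_true]
        have hb := (pv_rfind_bounds '/' t).2
        have hmax : max (PySem.Chars.rfind t ['/']) ((t.length : Int)) = t.length := by omega
        rw [if_neg (by subst h2; decide)]
        rw [hmax]
        apply List.drop_of_length_le
        simp
      · simp only [h1, h2, if_false]
        rw [if_pos (by simp [h1, h2])]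
        have b1 := pv_rfind_bounds '/' t
        have b2 := pv_rfind_bounds ':' t
        rw [List.drop_append_of_le_length (by simp; omega), ih]

theorem pv_getLastD_map (l : List (List Char)) :
    (l.map String.ofList).getLastD "" = String.ofList (l.getLastD []) := by
  induction l with
  | nil => rfl
  | cons a l ih =>
    rw [List.map_cons, List.getLastD_cons, List.getLastD_cons]
    cases l with
    | nil => rfl
    | cons b m =>
      rw [List.map_cons]
      rw [List.getLastD_cons, List.getLastD_cons]
      have : ∀ (xs : List (List Char)) (y : List Char), (xs.map String.ofList).getLastD (String.ofList y) = String.ofList (xs.getLastD y) := by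
        intro xs
        induction xs with
        | nil => intro y; rfl
        | cons u us ihu => intro y; rw [List.map_cons, List.getLastD_cons, List.getLastD_cons, ihu]
      exact this m b

theorem pv_strStep (w : String) (cs : String) (c : Char) (h : cs.toList = [c]) :
    (if PySem.Str.isIn cs w then ((PySem.Str.split? w cs).getD []).getLastD "" else w) =
      String.ofList (List.rtakeWhile (· != c) w.toList) := by
  by_cases hin : PySem.Str.isIn cs w
  · rw [if_pos hin]
    rw [PySem.Str.split?, PySem.Chars.split?, h]
    simp only [List.isEmpty_cons, Bool.false_eq_true, if_false, Option.map_some, Option.getD_some]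
    rw [pv_getLastD_map, pv_split_last]
  · rw [if_neg hin]
    have hmem : c ∉ w.toList := by
      intro hm
      apply hin
      rw [PySem.Str.isIn]
      rw [PySem.Chars.isIn_iff_infix, h]
      exact (List.singleton_infix_iff c w.toList).mpr hm
    rw [pv_rtake_all (by intro x hx; simp; rintro rfl; exact hmem hx), String.ofList_toList]

theorem pv_rtake_comp (w : List Char) :
    List.rtakeWhile (· != ':') (List.rtakeWhile (· != '/') w) =
      List.rtakeWhile (fun a => a != '/' && a != ':') w := by
  unfold List.rtakeWhile
  rw [List.reverse_reverse, List.takeWhile_takeWhile]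
  congr 1
  congr 1
  funext x
  by_cases h1 : x = '/' <;> by_cases h2 : x = ':' <;> subst_vars <;> simp_all

theorem pv_word (w : String) :
    (["/", ":"].foldl (fun s sep =>
        if PySem.Str.isIn sep s then ((PySem.Str.split? s sep).getD []).getLastD "" else s) w) =
      PySem.Str.slice w (some (max (PySem.Str.rfind w "/") (PySem.Str.rfind w ":") + 1)) none := by
  rw [List.foldl_cons, List.foldl_cons, List.foldl_nil]
  rw [pv_strStep w "/" '/' (by decide)]
  rw [pv_strStep _ ":" ':' (by decide)]
  rw [String.toList_ofList, pv_rtake_comp]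
  rw [PySem.Str.slice, PySem.Chars.slice_eq_listSlice]
  rw [PySem.Str.rfind, PySem.Str.rfind]
  have hb1 := (pv_rfind_bounds '/' w.toList).1
  have hb2 := (pv_rfind_bounds ':' w.toList).1
  rw [show (":" : String).toList = [':'] from by decide, show ("/" : String).toList = ['/'] from by decide]
  rw [PySem.List.slice_from _ (by omega)]
  rw [pv_drop_max]

-- ===== VERDICT (by name: the statement is the Claim_ definition above) =====
theorem normalize_model_id_spec : Claim_equal_normalize_model_id := by
  intro raw _
  unfold Spec_normalize_model_id normalize_model_id normalize_model_id_alt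
  simp only []
  split
  · rfl
  · rw [pv_word]
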